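-- pv_equiv track=rewrite | github.com/thomaswantstobeaskeleton/BallonsTranslator-Pro | modules/flow_fixer/context_builder.py | format_previous_as_parts
-- ===== SOURCE A (Python) =====
-- from typing import Any, Dict, List, Tuple
--
-- PART_SIZE = 5  # Group every N lines into a "part" for clarity
--
-- def format_previous_as_parts(prev_lines: List[str]) -> str:
--     """
--     Format previous lines in parts so conversations that are apart are distinct.
--     Parts are every PART_SIZE lines; labels: Part 1 (older), Part 2, ... Part N (most recent).
--     """
--     if not prev_lines:
--         return "(none)\n"
--     parts_text: List[str] = []
--     global_idx = 1
--     part_num = 1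
--     total_parts = (len(prev_lines) + PART_SIZE - 1) // PART_SIZE
--     for i in range(0, len(prev_lines), PART_SIZE):
--         chunk = prev_lines[i : i + PART_SIZE]
--         label = "Part 1 (older):" if part_num == 1 else (
--             f"Part {part_num} (most recent):" if part_num == total_parts else f"Part {part_num}:"
--         )
--         parts_text.append(label)
--         for line in chunk:
--             parts_text.append(f"{global_idx}. {line}")
--             global_idx += 1
--         part_num += 1
--     return "\n".join(parts_text) + "\n"
-- ===== SOURCE B (Python) =====
-- PART_SIZE = 5  # Group every N lines into a "part" for clarity
--
-- def format_previous_as_parts(prev_lines):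
--     if not prev_lines:
--         return "(none)\n"
--     total_parts = (len(prev_lines) + PART_SIZE - 1) // PART_SIZE
--     out = []
--     for idx, line in enumerate(prev_lines):
--         if idx % PART_SIZE == 0:
--             part_num = idx // PART_SIZE + 1
--             if part_num == 1:
--                 out.append("Part 1 (older):")
--             elif part_num == total_parts:
--                 out.append(f"Part {part_num} (most recent):")
--             else:
--                 out.append(f"Part {part_num}:")
--         out.append(f"{idx + 1}. {line}")
--     return "\n".join(out) + "\n"
-- ===== Notes on version B (the rewrite author's own statement) =====
-- stated objective: simpler
-- what changed: Replaces the nested chunk-slice loop (outer range-with-step, inner chunk walk, three hand-maintained counters) with one flat enumerate pass that emits a part header whenever idx % PART_SIZE == 0, deriving part number and line number from idx.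
import Mathlib
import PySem

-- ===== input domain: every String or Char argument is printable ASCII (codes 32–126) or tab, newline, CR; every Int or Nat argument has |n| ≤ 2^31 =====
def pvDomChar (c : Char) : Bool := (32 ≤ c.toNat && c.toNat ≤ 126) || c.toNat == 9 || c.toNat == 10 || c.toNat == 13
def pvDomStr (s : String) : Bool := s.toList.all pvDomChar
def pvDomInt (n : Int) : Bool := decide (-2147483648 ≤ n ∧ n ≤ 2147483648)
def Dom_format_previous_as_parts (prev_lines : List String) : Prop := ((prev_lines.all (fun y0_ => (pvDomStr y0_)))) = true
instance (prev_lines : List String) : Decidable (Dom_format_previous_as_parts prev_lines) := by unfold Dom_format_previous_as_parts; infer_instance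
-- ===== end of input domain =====

-- B replaces A's nested chunk-slice loop by one flat enumerate pass with a modulo test; objective: simpler.

-- ===== PORT A =====
-- outer 'for i in range(0, len(prev_lines), PART_SIZE)' loop, as recursion on i;
-- the inner 'for line in chunk' loop is the foldl over the slice.
def fpapLoopA (prev_lines : List String) (total_parts : Int) (i : Nat)
    (global_idx part_num : Int) (acc : List String) : List String :=
  if i < prev_lines.length then
    let chunk := PySem.List.slice prev_lines (some (i : Int)) (some ((i : Int) + 5))
    let label := if part_num = 1 then "Part 1 (older):"
      else if part_num = total_parts then "Part " ++ PySem.Int.toStr part_num ++ " (most recent):"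
      else "Part " ++ PySem.Int.toStr part_num ++ ":"
    let st := chunk.foldl (fun (p : List String × Int) line =>
        (p.1 ++ [PySem.Int.toStr p.2 ++ ". " ++ line], p.2 + 1)) (acc ++ [label], global_idx)
    fpapLoopA prev_lines total_parts (i + 5) st.2 (part_num + 1) st.1
  else acc
termination_by prev_lines.length - i

def format_previous_as_parts (prev_lines : List String) : String :=
  if prev_lines = [] then "(none)\n"
  else
    let total_parts := PySem.Int.floordiv ((prev_lines.length : Int) + 5 - 1) 5
    PySem.Str.join "\n" (fpapLoopA prev_lines total_parts 0 1 1 []) ++ "\n"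

-- ===== PORT B =====
-- single 'for idx, line in enumerate(prev_lines)' loop, as recursion on the list with an idx counter
def fpapLoopB (total_parts : Int) (idx : Nat) (lines : List String) (acc : List String) : List String :=
  match lines with
  | [] => acc
  | line :: rest =>
      let acc1 := if idx % 5 = 0 then
          let part_num : Int := ((idx / 5 : Nat) : Int) + 1
          acc ++ [if part_num = 1 then "Part 1 (older):"
                  else if part_num = total_parts then "Part " ++ PySem.Int.toStr part_num ++ " (most recent):"
                  else "Part " ++ PySem.Int.toStr part_num ++ ":"]
        else acc
      fpapLoopB total_parts (idx + 1) rest (acc1 ++ [PySem.Int.toStr ((idx : Int) + 1) ++ ". " ++ line])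

def format_previous_as_parts_alt (prev_lines : List String) : String :=
  if prev_lines = [] then "(none)\n"
  else
    let total_parts := PySem.Int.floordiv ((prev_lines.length : Int) + 5 - 1) 5
    PySem.Str.join "\n" (fpapLoopB total_parts 0 prev_lines []) ++ "\n"

-- ===== PRECONDITION & SPEC =====
def Spec_format_previous_as_parts (prev_lines : List String) (out : String) : Prop := out = format_previous_as_parts_alt prev_lines
instance (prev_lines : List String) (out : String) : Decidable (Spec_format_previous_as_parts prev_lines out) := by unfold Spec_format_previous_as_parts; infer_instance

-- ===== CLAIM (what is proved, stated in full; the proofs are below) =====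
def Claim_equal_format_previous_as_parts : Prop := ∀ (prev_lines : List String), Dom_format_previous_as_parts prev_lines → Spec_format_previous_as_parts prev_lines (format_previous_as_parts prev_lines)

-- ===== LEMMAS AND PROOFS =====

-- the numbered lines "g. x" for a chunk, starting at number g
def fpapNum (g : Int) : List String → List String
  | [] => []
  | x :: xs => (PySem.Int.toStr g ++ ". " ++ x) :: fpapNum (g + 1) xs

-- A's inner fold over a chunk appends the numbered lines and advances the counter
theorem fpapFoldA (c : List String) (g : Int) (acc : List String) :
    c.foldl (fun (p : List String × Int) line =>
        (p.1 ++ [PySem.Int.toStr p.2 ++ ". " ++ line], p.2 + 1)) (acc, g)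
      = (acc ++ fpapNum g c, g + c.length) := by
  induction c generalizing g acc with
  | nil => simp [fpapNum]
  | cons x xs ih =>
      simp only [List.foldl_cons, fpapNum, ih, List.length_cons, Prod.mk.injEq]
      refine ⟨by simp, by push_cast; ring⟩

-- B's loop over header-free indices appends the numbered lines
theorem fpapRunB (t : Int) (c r : List String) (idx : Nat) (acc : List String)
    (h : ∀ k < c.length, (idx + k) % 5 ≠ 0) :
    fpapLoopB t idx (c ++ r) acc = fpapLoopB t (idx + c.length) r (acc ++ fpapNum ((idx : Int) + 1) c) := by
  induction c generalizing idx acc with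
  | nil => simp [fpapNum]
  | cons x xs ih =>
      have h0 : idx % 5 ≠ 0 := by simpa using h 0 (by simp)
      simp only [List.cons_append, fpapLoopB, if_neg h0]
      rw [ih (idx + 1) _ (fun k hk => by
        have := h (k + 1) (by simpa using Nat.succ_lt_succ hk)
        omega)]
      have hc : ((idx + 1 : Nat) : Int) + 1 = (idx : Int) + 1 + 1 := by push_cast; ring
      rw [hc]
      simp only [fpapNum, List.length_cons]
      congr 1
      · omega
      · simp

-- main invariant: A's chunked loop from chunk q equals B's flat loop from index 5*q
theorem fpapMain (t : Int) (lines : List String) (q : Nat) (acc : List String) :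
    fpapLoopA lines t (5 * q) (5 * (q : Int) + 1) ((q : Int) + 1) acc
      = fpapLoopB t (5 * q) (lines.drop (5 * q)) acc := by
  by_cases hlt : 5 * q < lines.length
  · have hrest : lines.drop (5 * q) ≠ [] := by
      simp [List.drop_eq_nil_iff]; omega
    obtain ⟨line, rest', hr⟩ := List.exists_cons_of_ne_nil hrest
    have hlen : lines.length = 5 * q + 1 + rest'.length := by
      have := congrArg List.length hr
      simp at this; omega
    have hslice : PySem.List.slice lines (some ((5 * q : Nat) : Int)) (some (((5 * q : Nat) : Int) + 5))
        = line :: rest'.take 4 := by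
      have h5 : ((5 * q : Nat) : Int) + 5 = (((5 * q + 5 : Nat)) : Int) := by push_cast; ring
      rw [h5, PySem.List.slice_natCast]
      have h55 : 5 * q + 5 - 5 * q = 5 := by omega
      rw [h55, hr]
      rfl
    rw [fpapLoopA, if_pos hlt]
    simp only [hslice, fpapFoldA]
    -- B side: header + first numbered line, then the header-free rest of the chunk
    rw [hr]
    simp only [fpapLoopB]
    have hmod : 5 * q % 5 = 0 := by omega
    have hdiv : 5 * q / 5 = q := by omega
    simp only [if_pos hmod, hdiv]
    conv_rhs => rw [← List.take_append_drop 4 rest']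
    rw [fpapRunB t (rest'.take 4) (rest'.drop 4) (5 * q + 1) _ (fun k hk => by
      have hk4 : k < 4 := lt_of_lt_of_le hk (by simp)
      omega)]
    have hfn : fpapNum (5 * (q : Int) + 1) (line :: rest'.take 4)
        = (PySem.Int.toStr (((5 * q : Nat) : Int) + 1) ++ ". " ++ line)
            :: fpapNum (((5 * q + 1 : Nat) : Int) + 1) (rest'.take 4) := by
      simp only [fpapNum]
      push_cast
      rfl
    rw [hfn]
    by_cases hbig : 4 ≤ rest'.length
    · have htk : (rest'.take 4).length = 4 := by simp [hbig]
      have e1 : 5 * q + 1 + (rest'.take 4).length = 5 * (q + 1) := by omega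
      have e2 : 5 * (q : Int) + 1 + ((line :: rest'.take 4).length : Int) = 5 * (((q + 1 : Nat)) : Int) + 1 := by
        simp only [List.length_cons, htk]; push_cast; ring
      have e3 : (q : Int) + 1 + 1 = (((q + 1 : Nat)) : Int) + 1 := by push_cast; ring
      have hdrop : rest'.drop 4 = lines.drop (5 * (q + 1)) := by
        have h1 : lines.drop (5 * (q + 1)) = (lines.drop (5 * q)).drop 5 := by
          rw [List.drop_drop]; congr 1
        rw [h1, hr]
        simp
      have e0 : 5 * q + 5 = 5 * (q + 1) := by omega
      rw [e0, e1, e2, e3, hdrop, fpapMain t lines (q + 1)]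
      congr 1
      simp
    · have htk : rest'.take 4 = rest' := List.take_of_length_le (by omega)
      have hdr : rest'.drop 4 = [] := List.drop_eq_nil_of_le (by omega)
      rw [htk, hdr]
      rw [fpapLoopA, if_neg (by omega)]
      rw [fpapLoopB]
      simp
  · have hdrop : lines.drop (5 * q) = [] := List.drop_eq_nil_of_le (by omega)
    rw [fpapLoopA, if_neg hlt, hdrop, fpapLoopB]
termination_by lines.length - 5 * q
decreasing_by omega

-- ===== VERDICT (by name: the statement is the Claim_ definition above) =====
theorem format_previous_as_parts_spec : Claim_equal_format_previous_as_parts := by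
  intro prev_lines _
  unfold Spec_format_previous_as_parts format_previous_as_parts format_previous_as_parts_alt
  by_cases h : prev_lines = []
  · simp [h]
  · simp only [if_neg h]
    generalize PySem.Int.floordiv ((prev_lines.length : Int) + 5 - 1) 5 = T
    have h0 := fpapMain T prev_lines 0 []
    norm_num at h0
    rw [h0]
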